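-- pv_equiv track=rewrite | github.com/yongjingli/mmdetection3d-liyj | local_files/debug_gbld/debug_line_orient_decode.py | extend_endpoints
-- ===== SOURCE A (Python) =====
-- def extend_endpoints(selected_points, single_line):
--     min_x, max_x = 10000, 0
--     left_endpoints, right_endpoints = [], []
--     # 得到最左边和最右边的点
--     for s_pnt in selected_points:
--         if s_pnt[0] == min_x:
--             left_endpoints.append(s_pnt)
--         elif s_pnt[0] < min_x:
--             left_endpoints.clear()
--             left_endpoints.append(s_pnt)
--             min_x = s_pnt[0]
--         if s_pnt[0] == max_x:
--             right_endpoints.append(s_pnt)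
--         elif s_pnt[0] > max_x:
--             right_endpoints.clear()
--             right_endpoints.append(s_pnt)
--             max_x = s_pnt[0]
--     for x, y in left_endpoints:
--         while (x - 1, y) in single_line:
--             selected_points.append((x - 1, y))
--             x -= 1
--     for x, y in right_endpoints:
--         while (x + 1, y) in single_line:
--             selected_points.append((x + 1, y))
--             x += 1
--     return selected_points
-- ===== SOURCE B (Python) =====
-- def _row(single_line, y):
--     # sorted x-coordinates of the points of this row, deduplicated
--     return sorted({x for x, y2 in single_line if y2 == y})
--
--
-- def extend_endpoints(selected_points, single_line):
--     if not selected_points: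
--         return selected_points
--     min_x = min(p[0] for p in selected_points)
--     max_x = max(p[0] for p in selected_points)
--     left = [p for p in selected_points if p[0] == min_x]
--     right = [p for p in selected_points if p[0] == max_x]
--     for x, y in left:
--         for k, x2 in enumerate([x2 for x2 in reversed(_row(single_line, y)) if x2 < x]):
--             if x2 != x - 1 - k:
--                 break
--             selected_points.append((x2, y))
--     for x, y in right:
--         for k, x2 in enumerate([x2 for x2 in _row(single_line, y) if x2 > x]):
--             if x2 != x + 1 + k:
--                 break
--             selected_points.append((x2, y))
--     return selected_points
-- ===== Notes on version B (the rewrite author's own statement) =====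
-- stated objective: alternative
-- what changed: Replaces A's single stateful min/max-tracking pass (clear-and-restart endpoint lists, 10000/0 sentinels) and its unbounded while-membership walks by: true min/max of the x-coordinates, endpoint selection by two filters, and extension along the sorted, deduplicated x-coordinates of each endpoint's row (sort-then-scan with an enumerate counter instead of repeated list-membership tests).
-- intended difference: When every x-coordinate exceeds 10000 (or every x is negative) and the true leftmost (rightmost) point has a neighbour in single_line, A's hardcoded sentinels leave left_endpoints (right_endpoints) empty so A skips that extension and returns selected_points unextended on that side, while B extends from the true extreme point, which is the intended 'find leftmost/rightmost and extend' behaviour. — e.g. on extend_endpoints([(10001, 0)], [(10000, 0)]): A returns [(10001, 0)], B returns [(10001, 0), (10000, 0)]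
import Mathlib
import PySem

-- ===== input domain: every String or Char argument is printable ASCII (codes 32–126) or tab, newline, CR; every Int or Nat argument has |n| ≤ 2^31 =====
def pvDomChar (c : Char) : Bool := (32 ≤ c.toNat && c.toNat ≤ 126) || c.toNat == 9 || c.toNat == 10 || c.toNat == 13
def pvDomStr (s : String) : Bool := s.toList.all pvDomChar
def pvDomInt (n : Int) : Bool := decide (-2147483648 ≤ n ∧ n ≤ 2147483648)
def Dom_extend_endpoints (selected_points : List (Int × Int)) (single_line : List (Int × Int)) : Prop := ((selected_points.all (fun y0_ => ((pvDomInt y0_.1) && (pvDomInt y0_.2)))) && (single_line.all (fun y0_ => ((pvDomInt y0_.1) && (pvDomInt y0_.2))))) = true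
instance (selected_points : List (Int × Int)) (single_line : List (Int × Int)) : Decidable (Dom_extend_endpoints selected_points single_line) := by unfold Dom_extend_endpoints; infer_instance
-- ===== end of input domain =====

-- B extends from the true leftmost/rightmost points along the sorted x-coordinates of each
-- row, instead of A's sentinel-tracking pass and while-membership walks; equal outside D_.
-- Both Pythons append to selected_points in place; the equivalence is about the return value.

-- ===== PORT A =====

-- one iteration of A's first for-loop: update (min_x, max_x, left_endpoints, right_endpoints)
def loopA (st : Int × Int × List (Int × Int) × List (Int × Int)) (s : Int × Int) :
    Int × Int × List (Int × Int) × List (Int × Int) :=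
  let (mn, mx, L, R) := st
  let (mn, L) := if s.1 = mn then (mn, L ++ [s]) else if s.1 < mn then (s.1, [s]) else (mn, L)
  let (mx, R) := if s.1 = mx then (mx, R ++ [s]) else if s.1 > mx then (s.1, [s]) else (mx, R)
  (mn, mx, L, R)

-- A's `while (x-1, y) in single_line` loop, fuelled by |single_line|: every appended point is a
-- distinct member of single_line, so the Python loop never performs more iterations than that
-- and the fuelled recursion computes exactly the Python loop's result.
def whileLeftA (sl : List (Int × Int)) : Nat → Int → Int → List (Int × Int) → List (Int × Int)
  | 0, _, _, acc => acc
  | n+1, x, y, acc =>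
      if (x - 1, y) ∈ sl then whileLeftA sl n (x - 1) y (acc ++ [(x - 1, y)]) else acc

-- A's `while (x+1, y) in single_line` loop, fuelled the same way
def whileRightA (sl : List (Int × Int)) : Nat → Int → Int → List (Int × Int) → List (Int × Int)
  | 0, _, _, acc => acc
  | n+1, x, y, acc =>
      if (x + 1, y) ∈ sl then whileRightA sl n (x + 1) y (acc ++ [(x + 1, y)]) else acc

def extend_endpoints (selected_points : List (Int × Int)) (single_line : List (Int × Int)) : List (Int × Int) :=
  let st := selected_points.foldl loopA (10000, 0, [], [])
  let left_endpoints := st.2.2.1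
  let right_endpoints := st.2.2.2
  let sp1 := left_endpoints.foldl
    (fun acc p => whileLeftA single_line single_line.length p.1 p.2 acc) selected_points
  right_endpoints.foldl
    (fun acc p => whileRightA single_line single_line.length p.1 p.2 acc) sp1

-- ===== PORT B =====

-- _row(single_line, y) = sorted({x for x, y2 in single_line if y2 == y})
def rowOf (single_line : List (Int × Int)) (y : Int) : List Int :=
  PySem.List.sorted
    (PySem.Set.ofList ((single_line.filter (fun q => q.2 == y)).map Prod.fst))
    (fun v => v) false

-- 'for k, x2 in enumerate(lst): if x2 != x - 1 - k: break; selected_points.append((x2, y))'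
-- (the enumerate counter k is carried as an Int; its values agree with Python's Nat counter)
def takeRunL (x y : Int) : List Int → Int → List (Int × Int)
  | [], _ => []
  | a :: rest, k => if a = x - 1 - k then (a, y) :: takeRunL x y rest (k + 1) else []

def takeRunR (x y : Int) : List Int → Int → List (Int × Int)
  | [], _ => []
  | a :: rest, k => if a = x + 1 + k then (a, y) :: takeRunR x y rest (k + 1) else []

def extend_endpoints_alt (selected_points : List (Int × Int)) (single_line : List (Int × Int)) : List (Int × Int) :=
  if selected_points.isEmpty then selected_points else
  let min_x := (PySem.List.min? (selected_points.map Prod.fst) (fun v => v)).getD 0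
  let max_x := (PySem.List.max? (selected_points.map Prod.fst) (fun v => v)).getD 0
  let left := selected_points.filter (fun p => p.1 == min_x)
  let right := selected_points.filter (fun p => p.1 == max_x)
  let sp1 := left.foldl
    (fun acc p =>
      acc ++ takeRunL p.1 p.2
        (((rowOf single_line p.2).reverse).filter (fun a => decide (a < p.1))) 0)
    selected_points
  right.foldl
    (fun acc p =>
      acc ++ takeRunR p.1 p.2
        ((rowOf single_line p.2).filter (fun a => decide (p.1 < a))) 0)
    sp1

-- ===== PRECONDITION & SPEC =====

-- When every x-coordinate exceeds 10000 (or every x is negative) and the true leftmost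
-- (rightmost) point has a neighbour in single_line, A's hardcoded 10000/0 sentinels leave
-- its endpoint list empty so A skips that extension, while B extends from the true extreme
-- point — the intended 'find leftmost/rightmost and extend' behaviour.
def D_extend_endpoints (selected_points : List (Int × Int)) (single_line : List (Int × Int)) : Prop :=
  selected_points ≠ [] ∧
  (((∀ q ∈ selected_points, 10000 < q.1) ∧
      ∃ p ∈ selected_points, (∀ q ∈ selected_points, p.1 ≤ q.1) ∧ (p.1 - 1, p.2) ∈ single_line) ∨
   ((∀ q ∈ selected_points, q.1 < 0) ∧
      ∃ p ∈ selected_points, (∀ q ∈ selected_points, q.1 ≤ p.1) ∧ (p.1 + 1, p.2) ∈ single_line))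
instance (selected_points : List (Int × Int)) (single_line : List (Int × Int)) : Decidable (D_extend_endpoints selected_points single_line) := by unfold D_extend_endpoints; infer_instance

def Spec_extend_endpoints (selected_points : List (Int × Int)) (single_line : List (Int × Int)) (out : List (Int × Int)) : Prop := ¬ D_extend_endpoints selected_points single_line → out = extend_endpoints_alt selected_points single_line
instance (selected_points : List (Int × Int)) (single_line : List (Int × Int)) (out : List (Int × Int)) : Decidable (Spec_extend_endpoints selected_points single_line out) := by unfold Spec_extend_endpoints; infer_instance

def pvDiffWitness_extend_endpoints : (List (Int × Int)) × (List (Int × Int)) :=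
  ([(10001, 0)], [(10000, 0)])
def pvDiffWitnessOut_extend_endpoints : (List (Int × Int)) × (List (Int × Int)) :=
  ([(10001, 0)], [(10001, 0), (10000, 0)])

-- ===== CLAIM (what is proved, stated in full; the proofs are below) =====
def Claim_unchanged_extend_endpoints : Prop := ∀ (selected_points : List (Int × Int)) (single_line : List (Int × Int)), Dom_extend_endpoints selected_points single_line → Spec_extend_endpoints selected_points single_line (extend_endpoints selected_points single_line)
def Claim_changed_extend_endpoints : Prop := Dom_extend_endpoints (pvDiffWitness_extend_endpoints.1) (pvDiffWitness_extend_endpoints.2) ∧ D_extend_endpoints (pvDiffWitness_extend_endpoints.1) (pvDiffWitness_extend_endpoints.2) ∧ extend_endpoints (pvDiffWitness_extend_endpoints.1) (pvDiffWitness_extend_endpoints.2) = pvDiffWitnessOut_extend_endpoints.1 ∧ extend_endpoints_alt (pvDiffWitness_extend_endpoints.1) (pvDiffWitness_extend_endpoints.2) = pvDiffWitnessOut_extend_endpoints.2 ∧ pvDiffWitnessOut_extend_endpoints.1 ≠ pvDiffWitnessOut_extend_endpoints.2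
def Claim_exact_extend_endpoints : Prop := ∀ (selected_points : List (Int × Int)) (single_line : List (Int × Int)), Dom_extend_endpoints selected_points single_line → D_extend_endpoints selected_points single_line → extend_endpoints selected_points single_line ≠ extend_endpoints_alt selected_points single_line

-- ===== LEMMAS AND PROOFS =====

-- ---- pure versions of A's while loops ----
def chainL (sl : List (Int × Int)) : Nat → Int → Int → List (Int × Int)
  | 0, _, _ => []
  | n+1, x, y => if (x - 1, y) ∈ sl then (x - 1, y) :: chainL sl n (x - 1) y else []

def chainR (sl : List (Int × Int)) : Nat → Int → Int → List (Int × Int)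
  | 0, _, _ => []
  | n+1, x, y => if (x + 1, y) ∈ sl then (x + 1, y) :: chainR sl n (x + 1) y else []

theorem whileLeftA_eq (sl : List (Int × Int)) :
    ∀ (n : Nat) (x y : Int) (acc : List (Int × Int)),
      whileLeftA sl n x y acc = acc ++ chainL sl n x y := by
  intro n
  induction n with
  | zero => intro x y acc; simp [whileLeftA, chainL]
  | succ n ih =>
      intro x y acc
      simp only [whileLeftA, chainL]
      split_ifs with h
      · rw [ih]; simp
      · simp

theorem whileRightA_eq (sl : List (Int × Int)) :
    ∀ (n : Nat) (x y : Int) (acc : List (Int × Int)),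
      whileRightA sl n x y acc = acc ++ chainR sl n x y := by
  intro n
  induction n with
  | zero => intro x y acc; simp [whileRightA, chainR]
  | succ n ih =>
      intro x y acc
      simp only [whileRightA, chainR]
      split_ifs with h
      · rw [ih]; simp
      · simp

theorem chainL_nil (sl : List (Int × Int)) (n : Nat) (x y : Int)
    (h : (x - 1, y) ∉ sl) : chainL sl n x y = [] := by
  cases n with
  | zero => rfl
  | succ n => simp [chainL, h]

theorem chainR_nil (sl : List (Int × Int)) (n : Nat) (x y : Int)
    (h : (x + 1, y) ∉ sl) : chainR sl n x y = [] := by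
  cases n with
  | zero => rfl
  | succ n => simp [chainR, h]

-- ---- decomposition and characterisation of A's first loop ----
def loopMin (st : Int × List (Int × Int)) (s : Int × Int) : Int × List (Int × Int) :=
  if s.1 = st.1 then (st.1, st.2 ++ [s]) else if s.1 < st.1 then (s.1, [s]) else st

def loopMax (st : Int × List (Int × Int)) (s : Int × Int) : Int × List (Int × Int) :=
  if s.1 = st.1 then (st.1, st.2 ++ [s]) else if s.1 > st.1 then (s.1, [s]) else st

theorem loopA_decomp (l : List (Int × Int)) (mn mx : Int) (L R : List (Int × Int)) :
    l.foldl loopA (mn, mx, L, R) =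
      ((l.foldl loopMin (mn, L)).1, (l.foldl loopMax (mx, R)).1,
       (l.foldl loopMin (mn, L)).2, (l.foldl loopMax (mx, R)).2) := by
  induction l generalizing mn mx L R with
  | nil => rfl
  | cons p l ih =>
      simp only [List.foldl_cons, loopA, loopMin, loopMax]
      split_ifs <;> exact ih ..

theorem foldl_min_le (l : List (Int × Int)) (a : Int) :
    l.foldl (fun x p => min x p.1) a ≤ a := by
  induction l generalizing a with
  | nil => simp
  | cons p l ih => exact le_trans (ih (min a p.1)) (min_le_left _ _)

theorem foldl_max_ge (l : List (Int × Int)) (a : Int) :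
    a ≤ l.foldl (fun x p => max x p.1) a := by
  induction l generalizing a with
  | nil => simp
  | cons p l ih => exact le_trans (le_max_left _ _) (ih (max a p.1))

theorem foldl_min_comm (l : List (Int × Int)) :
    ∀ (a b : Int), l.foldl (fun x p => min x p.1) (min a b) =
      min a (l.foldl (fun x p => min x p.1) b) := by
  induction l with
  | nil => intro a b; rfl
  | cons p l ih =>
      intro a b
      simp only [List.foldl_cons, min_assoc]
      exact ih a (min b p.1)

theorem foldl_max_comm (l : List (Int × Int)) :
    ∀ (a b : Int), l.foldl (fun x p => max x p.1) (max a b) =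
      max a (l.foldl (fun x p => max x p.1) b) := by
  induction l with
  | nil => intro a b; rfl
  | cons p l ih =>
      intro a b
      simp only [List.foldl_cons, max_assoc]
      exact ih a (max b p.1)

theorem loopMin_char (l : List (Int × Int)) (mn : Int) (L : List (Int × Int)) :
    l.foldl loopMin (mn, L) =
      (l.foldl (fun a p => min a p.1) mn,
       (if l.foldl (fun a p => min a p.1) mn = mn then L else []) ++
         l.filter (fun p => p.1 == l.foldl (fun a p => min a p.1) mn)) := by
  induction l generalizing mn L with
  | nil => simp
  | cons p l ih =>
      simp only [List.foldl_cons, loopMin, List.filter_cons]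
      rcases lt_trichotomy p.1 mn with h | h | h
      · have hmin : min mn p.1 = p.1 := by omega
        rw [if_neg (by omega), if_pos h, ih]
        simp only [hmin]
        have hle := foldl_min_le l p.1
        rw [if_neg (show ¬ l.foldl (fun a q => min a q.1) p.1 = mn by omega)]
        by_cases he : l.foldl (fun a q => min a q.1) p.1 = p.1
        · rw [if_pos he, show (p.1 == l.foldl (fun a q => min a q.1) p.1) = true from
            beq_iff_eq.mpr he.symm]
          simp
        · rw [if_neg he, show (p.1 == l.foldl (fun a q => min a q.1) p.1) = false from
            beq_eq_false_iff_ne.mpr (by omega)]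
          simp
      · have hmin : min mn p.1 = mn := by omega
        rw [if_pos h, ih]
        simp only [hmin]
        have hle := foldl_min_le l mn
        by_cases he : l.foldl (fun a q => min a q.1) mn = mn
        · rw [if_pos he, if_pos he, show (p.1 == l.foldl (fun a q => min a q.1) mn) = true from
            beq_iff_eq.mpr (by omega)]
          simp
        · rw [if_neg he, if_neg he, show (p.1 == l.foldl (fun a q => min a q.1) mn) = false from
            beq_eq_false_iff_ne.mpr (by omega)]
          simp
      · have hmin : min mn p.1 = mn := by omega
        rw [if_neg (by omega), if_neg (by omega), ih]
        simp only [hmin]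
        have hle := foldl_min_le l mn
        rw [show (p.1 == l.foldl (fun a q => min a q.1) mn) = false from
            beq_eq_false_iff_ne.mpr (by omega)]
        simp

theorem loopMax_char (l : List (Int × Int)) (mx : Int) (R : List (Int × Int)) :
    l.foldl loopMax (mx, R) =
      (l.foldl (fun a p => max a p.1) mx,
       (if l.foldl (fun a p => max a p.1) mx = mx then R else []) ++
         l.filter (fun p => p.1 == l.foldl (fun a p => max a p.1) mx)) := by
  induction l generalizing mx R with
  | nil => simp
  | cons p l ih =>
      simp only [List.foldl_cons, loopMax, List.filter_cons]
      rcases lt_trichotomy mx p.1 with h | h | h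
      · have hmax : max mx p.1 = p.1 := by omega
        rw [if_neg (by omega), if_pos h, ih]
        simp only [hmax]
        have hge := foldl_max_ge l p.1
        rw [if_neg (show ¬ l.foldl (fun a q => max a q.1) p.1 = mx by omega)]
        by_cases he : l.foldl (fun a q => max a q.1) p.1 = p.1
        · rw [if_pos he, show (p.1 == l.foldl (fun a q => max a q.1) p.1) = true from
            beq_iff_eq.mpr he.symm]
          simp
        · rw [if_neg he, show (p.1 == l.foldl (fun a q => max a q.1) p.1) = false from
            beq_eq_false_iff_ne.mpr (by omega)]
          simp
      · have hmax : max mx p.1 = mx := by omega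
        rw [if_pos h.symm, ih]
        simp only [hmax]
        have hge := foldl_max_ge l mx
        by_cases he : l.foldl (fun a q => max a q.1) mx = mx
        · rw [if_pos he, if_pos he, show (p.1 == l.foldl (fun a q => max a q.1) mx) = true from
            beq_iff_eq.mpr (by omega)]
          simp
        · rw [if_neg he, if_neg he, show (p.1 == l.foldl (fun a q => max a q.1) mx) = false from
            beq_eq_false_iff_ne.mpr (by omega)]
          simp
      · have hmax : max mx p.1 = mx := by omega
        rw [if_neg (by omega), if_neg (by omega), ih]
        simp only [hmax]
        have hge := foldl_max_ge l mx
        rw [show (p.1 == l.foldl (fun a q => max a q.1) mx) = false from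
            beq_eq_false_iff_ne.mpr (by omega)]
        simp

theorem foldl_whileL (sl : List (Int × Int)) (L init : List (Int × Int)) :
    L.foldl (fun acc p => whileLeftA sl sl.length p.1 p.2 acc) init =
      init ++ L.flatMap (fun p => chainL sl sl.length p.1 p.2) :=
  (PySem.List.foldl_congr_mem L _ (fun acc p => acc ++ chainL sl sl.length p.1 p.2) init
      (fun acc p _ => whileLeftA_eq sl sl.length p.1 p.2 acc)).trans
    (PySem.List.foldl_append_eq_flatMap _ L init)

theorem foldl_whileR (sl : List (Int × Int)) (L init : List (Int × Int)) :
    L.foldl (fun acc p => whileRightA sl sl.length p.1 p.2 acc) init =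
      init ++ L.flatMap (fun p => chainR sl sl.length p.1 p.2) :=
  (PySem.List.foldl_congr_mem L _ (fun acc p => acc ++ chainR sl sl.length p.1 p.2) init
      (fun acc p _ => whileRightA_eq sl sl.length p.1 p.2 acc)).trans
    (PySem.List.foldl_append_eq_flatMap _ L init)

-- A in normal form: sp ++ (left endpoints).flatMap chainL ++ (right endpoints).flatMap chainR
theorem extA_eq (sp sl : List (Int × Int)) :
    extend_endpoints sp sl =
      sp ++ (sp.filter (fun p => p.1 == sp.foldl (fun a p => min a p.1) 10000)).flatMap
              (fun p => chainL sl sl.length p.1 p.2)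
         ++ (sp.filter (fun p => p.1 == sp.foldl (fun a p => max a p.1) 0)).flatMap
              (fun p => chainR sl sl.length p.1 p.2) := by
  unfold extend_endpoints
  rw [loopA_decomp, loopMin_char, loopMax_char]
  simp only [ite_self, List.nil_append]
  rw [foldl_whileL, foldl_whileR]

-- ---- properties of B's sorted rows ----
theorem rowOf_mem (sl : List (Int × Int)) (y a : Int) :
    a ∈ rowOf sl y ↔ (a, y) ∈ sl := by
  unfold rowOf
  rw [PySem.List.mem_sorted, PySem.Set.mem_ofList, List.mem_map]
  constructor
  · rintro ⟨q, hq, rfl⟩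
    rw [List.mem_filter] at hq
    have : q.2 = y := by simpa using hq.2
    have : q = (q.1, y) := by rw [← this]
    rw [← this]; exact hq.1
  · intro h
    exact ⟨(a, y), List.mem_filter.mpr ⟨h, by simp⟩, rfl⟩

theorem rowOf_sorted (sl : List (Int × Int)) (y : Int) :
    (rowOf sl y).Pairwise (· < ·) :=
  PySem.List.sorted_ofList_pairwise_lt _

theorem rowOf_length_le (sl : List (Int × Int)) (y : Int) :
    (rowOf sl y).length ≤ sl.length := by
  unfold rowOf
  rw [PySem.List.length_sorted]
  calc (PySem.Set.ofList ((sl.filter (fun q => q.2 == y)).map Prod.fst)).length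
      ≤ ((sl.filter (fun q => q.2 == y)).map Prod.fst).length :=
        PySem.Set.length_ofList_le _
    _ = (sl.filter (fun q => q.2 == y)).length := by rw [List.length_map]
    _ ≤ sl.length := List.length_filter_le _ _

-- ---- the core sort-then-scan = membership-walk equivalences ----
theorem chainL_eq_takeRunL (sl : List (Int × Int)) (y x : Int) :
    ∀ (D : List Int) (k : Int) (n : Nat),
      D.length ≤ n →
      D.Pairwise (fun a b => b < a) →
      (∀ a : Int, a ∈ D ↔ ((a, y) ∈ sl ∧ a < x - k)) →
      chainL sl n (x - k) y = takeRunL x y D k := by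
  intro D
  induction D with
  | nil =>
      intro k n _ _ hmem
      rw [takeRunL]
      cases n with
      | zero => rfl
      | succ n =>
          rw [chainL, if_neg]
          intro hin
          have : (x - k - 1) ∈ ([] : List Int) := (hmem _).mpr ⟨hin, by omega⟩
          simp at this
  | cons a rest ih =>
      intro k n hlen hpw hmem
      cases n with
      | zero => simp at hlen
      | succ n =>
          have ha := (hmem a).mp (List.mem_cons_self ..)
          have hpw' := List.pairwise_cons.mp hpw
          by_cases hae : a = x - 1 - k
          · rw [takeRunL, if_pos hae, chainL,
                if_pos (show (x - k - 1, y) ∈ sl by rw [show x - k - 1 = a by omega]; exact ha.1)]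
            have hrec : chainL sl n (x - (k + 1)) y = takeRunL x y rest (k + 1) := by
              refine ih (k + 1) n (by simp only [List.length_cons] at hlen; omega) hpw'.2 ?_
              intro b
              constructor
              · intro hb
                exact ⟨((hmem b).mp (List.mem_cons_of_mem _ hb)).1,
                       by have := hpw'.1 b hb; omega⟩
              · rintro ⟨hbs, hblt⟩
                have hbD : b ∈ a :: rest := (hmem b).mpr ⟨hbs, by omega⟩
                rcases List.mem_cons.mp hbD with rfl | h
                · omega
                · exact h
            rw [show x - k - 1 = x - (k + 1) by omega, hrec,
                show x - (k + 1) = a by omega]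
          · rw [takeRunL, if_neg hae]
            apply chainL_nil
            intro hin
            have hD : (x - k - 1) ∈ a :: rest := (hmem _).mpr ⟨hin, by omega⟩
            rcases List.mem_cons.mp hD with he | h
            · omega
            · have h1 := hpw'.1 _ h
              have h2 : a < x - k := ha.2
              omega

theorem chainR_eq_takeRunR (sl : List (Int × Int)) (y x : Int) :
    ∀ (D : List Int) (k : Int) (n : Nat),
      D.length ≤ n →
      D.Pairwise (fun a b => a < b) →
      (∀ a : Int, a ∈ D ↔ ((a, y) ∈ sl ∧ x + k < a)) →
      chainR sl n (x + k) y = takeRunR x y D k := by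
  intro D
  induction D with
  | nil =>
      intro k n _ _ hmem
      rw [takeRunR]
      cases n with
      | zero => rfl
      | succ n =>
          rw [chainR, if_neg]
          intro hin
          have : (x + k + 1) ∈ ([] : List Int) := (hmem _).mpr ⟨hin, by omega⟩
          simp at this
  | cons a rest ih =>
      intro k n hlen hpw hmem
      cases n with
      | zero => simp at hlen
      | succ n =>
          have ha := (hmem a).mp (List.mem_cons_self ..)
          have hpw' := List.pairwise_cons.mp hpw
          by_cases hae : a = x + 1 + k
          · rw [takeRunR, if_pos hae, chainR,
                if_pos (show (x + k + 1, y) ∈ sl by rw [show x + k + 1 = a by omega]; exact ha.1)]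
            have hrec : chainR sl n (x + (k + 1)) y = takeRunR x y rest (k + 1) := by
              refine ih (k + 1) n (by simp only [List.length_cons] at hlen; omega) hpw'.2 ?_
              intro b
              constructor
              · intro hb
                exact ⟨((hmem b).mp (List.mem_cons_of_mem _ hb)).1,
                       by have := hpw'.1 b hb; omega⟩
              · rintro ⟨hbs, hblt⟩
                have hbD : b ∈ a :: rest := (hmem b).mpr ⟨hbs, by omega⟩
                rcases List.mem_cons.mp hbD with rfl | h
                · omega
                · exact h
            rw [show x + k + 1 = x + (k + 1) by omega, hrec,
                show x + (k + 1) = a by omega]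
          · rw [takeRunR, if_neg hae]
            apply chainR_nil
            intro hin
            have hD : (x + k + 1) ∈ a :: rest := (hmem _).mpr ⟨hin, by omega⟩
            rcases List.mem_cons.mp hD with he | h
            · omega
            · have h1 := hpw'.1 _ h
              have h2 : x + k < a := ha.2
              omega

theorem stepL_eq (sl : List (Int × Int)) (x y : Int) :
    takeRunL x y (((rowOf sl y).reverse).filter (fun a => decide (a < x))) 0 =
      chainL sl sl.length x y := by
  have h := chainL_eq_takeRunL sl y x
    (((rowOf sl y).reverse).filter (fun a => decide (a < x))) 0 sl.length
    (le_trans (le_trans (List.length_filter_le _ _) (by rw [List.length_reverse]))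
       (rowOf_length_le sl y))
    ((List.pairwise_reverse.mpr (rowOf_sorted sl y)).filter _)
    (by
      intro a
      rw [List.mem_filter, List.mem_reverse, rowOf_mem]
      simp)
  rw [show x - 0 = x by omega] at h
  exact h.symm

theorem stepR_eq (sl : List (Int × Int)) (x y : Int) :
    takeRunR x y ((rowOf sl y).filter (fun a => decide (x < a))) 0 =
      chainR sl sl.length x y := by
  have h := chainR_eq_takeRunR sl y x
    ((rowOf sl y).filter (fun a => decide (x < a))) 0 sl.length
    (le_trans (List.length_filter_le _ _) (rowOf_length_le sl y))
    ((rowOf_sorted sl y).filter _)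
    (by
      intro a
      rw [List.mem_filter, rowOf_mem]
      simp)
  rw [show x + 0 = x by omega] at h
  exact h.symm

theorem foldl_takeL (sl : List (Int × Int)) (L init : List (Int × Int)) :
    L.foldl
      (fun acc p =>
        acc ++ takeRunL p.1 p.2
          (((rowOf sl p.2).reverse).filter (fun a => decide (a < p.1))) 0) init =
      init ++ L.flatMap (fun p => chainL sl sl.length p.1 p.2) :=
  (PySem.List.foldl_congr_mem L _ (fun acc p => acc ++ chainL sl sl.length p.1 p.2) init
      (fun acc p _ => by rw [stepL_eq])).trans
    (PySem.List.foldl_append_eq_flatMap _ L init)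

theorem foldl_takeR (sl : List (Int × Int)) (L init : List (Int × Int)) :
    L.foldl
      (fun acc p =>
        acc ++ takeRunR p.1 p.2
          ((rowOf sl p.2).filter (fun a => decide (p.1 < a))) 0) init =
      init ++ L.flatMap (fun p => chainR sl sl.length p.1 p.2) :=
  (PySem.List.foldl_congr_mem L _ (fun acc p => acc ++ chainR sl sl.length p.1 p.2) init
      (fun acc p _ => by rw [stepR_eq])).trans
    (PySem.List.foldl_append_eq_flatMap _ L init)

-- B in normal form (nonempty input)
theorem extB_eq (q : Int × Int) (t sl : List (Int × Int)) :
    extend_endpoints_alt (q :: t) sl =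
      (q :: t)
        ++ ((q :: t).filter (fun p => p.1 == t.foldl (fun a p => min a p.1) q.1)).flatMap
             (fun p => chainL sl sl.length p.1 p.2)
        ++ ((q :: t).filter (fun p => p.1 == t.foldl (fun a p => max a p.1) q.1)).flatMap
             (fun p => chainR sl sl.length p.1 p.2) := by
  unfold extend_endpoints_alt
  rw [if_neg (by simp)]
  have hmin : (PySem.List.min? ((q :: t).map Prod.fst) (fun v => v)).getD 0 =
      t.foldl (fun a p => min a p.1) q.1 := by
    rw [List.map_cons, PySem.List.min?_id_cons, Option.getD_some, List.foldl_map]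
  have hmax : (PySem.List.max? ((q :: t).map Prod.fst) (fun v => v)).getD 0 =
      t.foldl (fun a p => max a p.1) q.1 := by
    rw [List.map_cons, PySem.List.max?_id_cons, Option.getD_some, List.foldl_map]
  simp only [hmin, hmax]
  rw [foldl_takeL, foldl_takeR]

-- ---- facts about the running min/max of the x-coordinates ----
theorem minfold_le (q : Int × Int) (t : List (Int × Int)) :
    ∀ r ∈ q :: t, t.foldl (fun a p => min a p.1) q.1 ≤ r.1 := by
  intro r hr
  rw [show t.foldl (fun a p => min a p.1) q.1 = (t.map Prod.fst).foldl min q.1 from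
      (List.foldl_map ..).symm]
  rcases List.mem_cons.mp hr with rfl | h
  · exact (PySem.List.foldl_min_le _ _).1
  · exact (PySem.List.foldl_min_le _ _).2 _ (List.mem_map_of_mem h)

theorem maxfold_ge (q : Int × Int) (t : List (Int × Int)) :
    ∀ r ∈ q :: t, r.1 ≤ t.foldl (fun a p => max a p.1) q.1 := by
  intro r hr
  rw [show t.foldl (fun a p => max a p.1) q.1 = (t.map Prod.fst).foldl max q.1 from
      (List.foldl_map ..).symm]
  rcases List.mem_cons.mp hr with rfl | h
  · exact (PySem.List.le_foldl_max _ _).1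
  · exact (PySem.List.le_foldl_max _ _).2 _ (List.mem_map_of_mem h)

theorem minfold_attained (q : Int × Int) (t : List (Int × Int)) :
    ∃ r ∈ q :: t, t.foldl (fun a p => min a p.1) q.1 = r.1 := by
  rw [show t.foldl (fun a p => min a p.1) q.1 = (t.map Prod.fst).foldl min q.1 from
      (List.foldl_map ..).symm]
  rcases PySem.List.foldl_min_mem (t.map Prod.fst) q.1 with h | h
  · exact ⟨q, List.mem_cons_self .., h⟩
  · rcases List.mem_map.mp h with ⟨r, hr, he⟩
    exact ⟨r, List.mem_cons_of_mem _ hr, he.symm⟩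

theorem maxfold_attained (q : Int × Int) (t : List (Int × Int)) :
    ∃ r ∈ q :: t, t.foldl (fun a p => max a p.1) q.1 = r.1 := by
  rw [show t.foldl (fun a p => max a p.1) q.1 = (t.map Prod.fst).foldl max q.1 from
      (List.foldl_map ..).symm]
  rcases PySem.List.foldl_max_mem (t.map Prod.fst) q.1 with h | h
  · exact ⟨q, List.mem_cons_self .., h⟩
  · rcases List.mem_map.mp h with ⟨r, hr, he⟩
    exact ⟨r, List.mem_cons_of_mem _ hr, he.symm⟩

theorem foldA_min (q : Int × Int) (t : List (Int × Int)) :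
    (q :: t).foldl (fun a p => min a p.1) 10000 =
      min 10000 (t.foldl (fun a p => min a p.1) q.1) := by
  simp only [List.foldl_cons]
  exact foldl_min_comm t 10000 q.1

theorem foldA_max (q : Int × Int) (t : List (Int × Int)) :
    (q :: t).foldl (fun a p => max a p.1) 0 =
      max 0 (t.foldl (fun a p => max a p.1) q.1) := by
  simp only [List.foldl_cons]
  exact foldl_max_comm t 0 q.1

-- the two flatMap terms coincide unless A's sentinel hides the true extreme AND it extends
theorem left_term_eq (q : Int × Int) (t sl : List (Int × Int))
    (hC1 : ¬ ((∀ r ∈ q :: t, 10000 < r.1) ∧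
        ∃ p ∈ q :: t, (∀ r ∈ q :: t, p.1 ≤ r.1) ∧ (p.1 - 1, p.2) ∈ sl)) :
    ((q :: t).filter (fun p => p.1 == (q :: t).foldl (fun a p => min a p.1) 10000)).flatMap
        (fun p => chainL sl sl.length p.1 p.2) =
      ((q :: t).filter (fun p => p.1 == t.foldl (fun a p => min a p.1) q.1)).flatMap
        (fun p => chainL sl sl.length p.1 p.2) := by
  rw [foldA_min]
  by_cases hex : ∃ r ∈ q :: t, r.1 ≤ 10000
  · rcases hex with ⟨r, hr, hle⟩
    have hm := minfold_le q t r hr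
    rw [show min 10000 (t.foldl (fun a p => min a p.1) q.1) =
        t.foldl (fun a p => min a p.1) q.1 by omega]
  · push_neg at hex
    rcases minfold_attained q t with ⟨r, hr, he⟩
    have hm : 10000 < t.foldl (fun a p => min a p.1) q.1 := by
      have := hex r hr; omega
    rw [show min 10000 (t.foldl (fun a p => min a p.1) q.1) = 10000 by omega]
    have h1 : ((q :: t).filter (fun p => p.1 == (10000 : Int))) = [] := by
      rw [List.filter_eq_nil_iff]
      intro p hp
      have := hex p hp
      simp only [beq_iff_eq]; omega
    rw [h1, List.flatMap_nil]
    symm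
    rw [List.flatMap_eq_nil_iff]
    intro p hp
    rw [List.mem_filter, beq_iff_eq] at hp
    apply chainL_nil
    have hleft : ∀ r' ∈ q :: t, p.1 ≤ r'.1 := by
      intro r' hr'
      rw [hp.2]; exact minfold_le q t r' hr'
    intro hin
    exact hC1 ⟨hex, ⟨p, hp.1, hleft, hin⟩⟩

theorem right_term_eq (q : Int × Int) (t sl : List (Int × Int))
    (hC2 : ¬ ((∀ r ∈ q :: t, r.1 < 0) ∧
        ∃ p ∈ q :: t, (∀ r ∈ q :: t, r.1 ≤ p.1) ∧ (p.1 + 1, p.2) ∈ sl)) :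
    ((q :: t).filter (fun p => p.1 == (q :: t).foldl (fun a p => max a p.1) 0)).flatMap
        (fun p => chainR sl sl.length p.1 p.2) =
      ((q :: t).filter (fun p => p.1 == t.foldl (fun a p => max a p.1) q.1)).flatMap
        (fun p => chainR sl sl.length p.1 p.2) := by
  rw [foldA_max]
  by_cases hex : ∃ r ∈ q :: t, 0 ≤ r.1
  · rcases hex with ⟨r, hr, hle⟩
    have hm := maxfold_ge q t r hr
    rw [show max 0 (t.foldl (fun a p => max a p.1) q.1) =
        t.foldl (fun a p => max a p.1) q.1 by omega]
  · push_neg at hex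
    rcases maxfold_attained q t with ⟨r, hr, he⟩
    have hm : t.foldl (fun a p => max a p.1) q.1 < 0 := by
      have := hex r hr; omega
    rw [show max 0 (t.foldl (fun a p => max a p.1) q.1) = 0 by omega]
    have h1 : ((q :: t).filter (fun p => p.1 == (0 : Int))) = [] := by
      rw [List.filter_eq_nil_iff]
      intro p hp
      have := hex p hp
      simp only [beq_iff_eq]; omega
    rw [h1, List.flatMap_nil]
    symm
    rw [List.flatMap_eq_nil_iff]
    intro p hp
    rw [List.mem_filter, beq_iff_eq] at hp
    apply chainR_nil
    have hright : ∀ r' ∈ q :: t, r'.1 ≤ p.1 := by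
      intro r' hr'
      rw [hp.2]; exact maxfold_ge q t r' hr'
    intro hin
    exact hC2 ⟨hex, ⟨p, hp.1, hright, hin⟩⟩

-- ===== VERDICT (by name: the statements are the Claim_ definitions above) =====
theorem extend_endpoints_spec : Claim_unchanged_extend_endpoints := by
  intro sp sl _ hnD
  cases sp with
  | nil => rfl
  | cons q t =>
      unfold D_extend_endpoints at hnD
      have h1 := fun h => hnD ⟨List.cons_ne_nil _ _, h⟩
      have h2 := not_or.mp h1
      rw [extA_eq, extB_eq, left_term_eq q t sl h2.1, right_term_eq q t sl h2.2]

theorem extend_endpoints_changed : Claim_changed_extend_endpoints := by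
  unfold Claim_changed_extend_endpoints; decide

theorem extend_endpoints_tight : Claim_exact_extend_endpoints := by
  intro sp sl _ hD
  rcases hD with ⟨hne, hD⟩
  cases sp with
  | nil => exact absurd rfl hne
  | cons q t =>
      rw [extA_eq, extB_eq]
      rcases hD with ⟨hall, p, hp, hleft, hin⟩ | ⟨hall, p, hp, hright, hin⟩
      · -- all x > 10000: A's left list is empty, B's extends; right terms coincide
        have hRight : ¬ ((∀ r ∈ q :: t, r.1 < 0) ∧
            ∃ p' ∈ q :: t, (∀ r ∈ q :: t, r.1 ≤ p'.1) ∧ (p'.1 + 1, p'.2) ∈ sl) := by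
          rintro ⟨h0, -⟩
          have := h0 q (List.mem_cons_self ..)
          have := hall q (List.mem_cons_self ..)
          omega
        rw [← right_term_eq q t sl hRight]
        have hLA : ((q :: t).filter
            (fun p => p.1 == (q :: t).foldl (fun a p => min a p.1) 10000)) = [] := by
          rw [foldA_min]
          rcases minfold_attained q t with ⟨r, hr, he⟩
          have hm : 10000 < t.foldl (fun a p => min a p.1) q.1 := by
            have := hall r hr; omega
          rw [show min 10000 (t.foldl (fun a p => min a p.1) q.1) = 10000 by omega,
              List.filter_eq_nil_iff]
          intro r' hr'
          have := hall r' hr'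
          simp only [beq_iff_eq]; omega
        rw [hLA, List.flatMap_nil]
        have hpm : p.1 = t.foldl (fun a p => min a p.1) q.1 := by
          rcases minfold_attained q t with ⟨r, hr, he⟩
          have h1 := minfold_le q t p hp
          have h2 := hleft r hr
          omega
        have hLB : ((q :: t).filter
            (fun p' => p'.1 == t.foldl (fun a p => min a p.1) q.1)).flatMap
              (fun p' => chainL sl sl.length p'.1 p'.2) ≠ [] := by
          intro hz
          rw [List.flatMap_eq_nil_iff] at hz
          have hmem : p ∈ (q :: t).filter
              (fun p' => p'.1 == t.foldl (fun a p => min a p.1) q.1) :=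
            List.mem_filter.mpr ⟨hp, beq_iff_eq.mpr hpm⟩
          have := hz p hmem
          rcases sl with _ | ⟨s, sl'⟩
          · simp at hin
          · rw [List.length_cons, chainL, if_pos hin] at this
            simp at this
        intro hco
        apply hLB
        have hlen := congrArg List.length hco
        simp only [List.length_append, List.length_nil] at hlen
        exact List.eq_nil_of_length_eq_zero (by omega)
      · -- all x < 0: A's right list is empty, B's extends; left terms coincide
        have hLeft : ¬ ((∀ r ∈ q :: t, 10000 < r.1) ∧
            ∃ p' ∈ q :: t, (∀ r ∈ q :: t, p'.1 ≤ r.1) ∧ (p'.1 - 1, p'.2) ∈ sl) := by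
          rintro ⟨h0, -⟩
          have := h0 q (List.mem_cons_self ..)
          have := hall q (List.mem_cons_self ..)
          omega
        rw [left_term_eq q t sl hLeft]
        have hRA : ((q :: t).filter
            (fun p => p.1 == (q :: t).foldl (fun a p => max a p.1) 0)) = [] := by
          rw [foldA_max]
          rcases maxfold_attained q t with ⟨r, hr, he⟩
          have hm : t.foldl (fun a p => max a p.1) q.1 < 0 := by
            have := hall r hr; omega
          rw [show max 0 (t.foldl (fun a p => max a p.1) q.1) = 0 by omega,
              List.filter_eq_nil_iff]
          intro r' hr'
          have := hall r' hr'
          simp only [beq_iff_eq]; omega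
        rw [hRA, List.flatMap_nil, List.append_nil]
        have hpm : p.1 = t.foldl (fun a p => max a p.1) q.1 := by
          rcases maxfold_attained q t with ⟨r, hr, he⟩
          have h1 := maxfold_ge q t p hp
          have h2 := hright r hr
          omega
        have hRB : ((q :: t).filter
            (fun p' => p'.1 == t.foldl (fun a p => max a p.1) q.1)).flatMap
              (fun p' => chainR sl sl.length p'.1 p'.2) ≠ [] := by
          intro hz
          rw [List.flatMap_eq_nil_iff] at hz
          have hmem : p ∈ (q :: t).filter
              (fun p' => p'.1 == t.foldl (fun a p => max a p.1) q.1) :=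
            List.mem_filter.mpr ⟨hp, beq_iff_eq.mpr hpm⟩
          have := hz p hmem
          rcases sl with _ | ⟨s, sl'⟩
          · simp at hin
          · rw [List.length_cons, chainR, if_pos hin] at this
            simp at this
        intro hco
        apply hRB
        have hlen := congrArg List.length hco
        simp only [List.length_append] at hlen
        exact List.eq_nil_of_length_eq_zero (by omega)
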